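-- pv_equiv track=rewrite | github.com/abhipad14/Data_Structures_-_Algorithms | Top Coder/FilipTheFrog.py | countReachableIslands
-- ===== SOURCE A (Python) =====
-- def countReachableIslands(position, L):
--     start = position[0]
--     position = list(position)
--     position.sort()
--     count = 0
--     index = 0
--     for i in range(len(position)):
--         if position[i] == start:
--             index = i
--             count += 1
--             break
--     prev = start
--     for i in range(index+1, len(position)):
--         if position[i] <= prev+L:
--             count += 1
--             prev = position[i]
--         else:
--             break
--     prev = start
--     for i in range(index-1, -1, -1):
--         if position[i] >= prev - L:
--             count += 1
--             prev = position[i]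
--         else:
--             break
--     return count
-- ===== SOURCE B (Python) =====
-- def _chunks(s, L):
--     """Split sorted s into maximal consecutive runs whose adjacent gaps are <= L."""
--     groups = []
--     i = 0
--     n = len(s)
--     while i < n:
--         j = i + 1
--         while j < n and s[j] - s[j - 1] <= L:
--             j += 1
--         groups.append(s[i:j])
--         i = j
--     return groups
--
-- def countReachableIslands(position, L):
--     start = position[0]
--     s = sorted(position)
--     for g in _chunks(s, L):
--         if start in g:
--             return len(g)
-- ===== Notes on version B (the rewrite author's own statement) =====
-- stated objective: alternative
-- what changed: Instead of locating the start's index in the sorted list and expanding rightwards and leftwards with two greedy loops, B partitions the sorted list once into maximal gap-<=L groups and returns the size of the (first) group containing the start value.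
import Mathlib
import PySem

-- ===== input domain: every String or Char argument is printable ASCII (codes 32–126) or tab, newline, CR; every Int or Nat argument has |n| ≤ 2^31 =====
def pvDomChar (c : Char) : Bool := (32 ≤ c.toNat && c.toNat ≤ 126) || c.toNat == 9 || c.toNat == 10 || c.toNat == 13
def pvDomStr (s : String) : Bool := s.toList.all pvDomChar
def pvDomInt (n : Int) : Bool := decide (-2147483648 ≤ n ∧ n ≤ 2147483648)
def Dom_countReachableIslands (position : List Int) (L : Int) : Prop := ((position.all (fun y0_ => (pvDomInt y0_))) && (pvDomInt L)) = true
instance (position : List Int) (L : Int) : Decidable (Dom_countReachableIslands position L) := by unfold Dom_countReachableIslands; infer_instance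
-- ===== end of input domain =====

-- B partitions the sorted list once into maximal gap-≤L groups and returns the size of the
-- first group containing the start value, instead of A's find-index-then-expand-both-ways loops.

-- ===== PORT A =====
-- first for-loop: find first index equal to start (index, count after possible break)
def criLoop1 (start : Int) : List Int → Nat → Nat × Int
  | [], _ => (0, 0)
  | x :: xs, i => if x = start then (i, 1) else criLoop1 start xs (i + 1)

-- second for-loop: expand rightwards while position[i] <= prev + L
def criLoop2 (L : Int) (prev : Int) (count : Int) : List Int → Int
  | [] => count
  | x :: xs => if x ≤ prev + L then criLoop2 L x (count + 1) xs else count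

-- third for-loop: expand leftwards while position[i] >= prev - L
def criLoop3 (L : Int) (prev : Int) (count : Int) : List Int → Int
  | [] => count
  | x :: xs => if x ≥ prev - L then criLoop3 L x (count + 1) xs else count

-- the body after `start = position[0]` succeeded: sort, find index, expand right, expand left
def criMain (start : Int) (s : List Int) (L : Int) : Int :=
  let r := criLoop1 start s 0
  let count2 := criLoop2 L start r.2 (s.drop (r.1 + 1))
  criLoop3 L start count2 ((s.take r.1).reverse)

def countReachableIslands (position : List Int) (L : Int) : Int :=
  match PySem.List.pyGet? position 0 with
  | none => 0  -- Python raises IndexError here; excluded by Pre_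
  | some start => criMain start (PySem.List.sorted position (fun x => x) false) L

-- ===== PORT B =====
-- _run: longest prefix of xs chaining from prev with adjacent gaps ≤ L, plus the rest
def pvRun (prev : Int) (xs : List Int) (L : Int) : List Int × List Int :=
  match xs with
  | [] => ([], [])
  | x :: xs' => if x - prev ≤ L then
      let r := pvRun x xs' L
      (x :: r.1, r.2)
    else ([], x :: xs')

-- termination helper for pvChunks (the rest is no longer than the input)
theorem pvRun_rest_le (xs : List Int) : ∀ prev L, ((pvRun prev xs L).2).length ≤ xs.length := by
  induction xs with
  | nil => intro prev L; simp [pvRun]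
  | cons x xs ih =>
    intro prev L
    by_cases h : x - prev ≤ L
    · simp only [pvRun, if_pos h]
      exact Nat.le_succ_of_le (ih x L)
    · simp only [pvRun]
      rw [if_neg h]

-- _chunks: split sorted s into maximal consecutive runs whose adjacent gaps are ≤ L
def pvChunks (s : List Int) (L : Int) : List (List Int) :=
  match s with
  | [] => []
  | x :: xs =>
    (x :: (pvRun x xs L).1) :: pvChunks (pvRun x xs L).2 L
termination_by s.length
decreasing_by exact Nat.lt_succ_of_le (pvRun_rest_le xs x L)

-- the for-loop with early return: first group containing start
def pvFind (start : Int) : List (List Int) → Int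
  | [] => 0  -- unreachable in Python (start is always in some group)
  | g :: gs => if start ∈ g then (g.length : Int) else pvFind start gs

def countReachableIslands_alt (position : List Int) (L : Int) : Int :=
  match PySem.List.pyGet? position 0 with
  | none => 0  -- Python raises IndexError here; excluded by Pre_
  | some start => pvFind start (pvChunks (PySem.List.sorted position (fun x => x) false) L)

-- ===== PRECONDITION & SPEC =====
-- Pre_ excludes only the empty list, on which A (position[0]) raises IndexError.
def Pre_countReachableIslands (position : List Int) (L : Int) : Prop := position ≠ []
instance (position : List Int) (L : Int) : Decidable (Pre_countReachableIslands position L) := by unfold Pre_countReachableIslands; infer_instance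

def pvWitness_countReachableIslands : List Int × Int := ([4, 7, 1, 7, 12], 3)

def Spec_countReachableIslands (position : List Int) (L : Int) (out : Int) : Prop := out = countReachableIslands_alt position L
instance (position : List Int) (L : Int) (out : Int) : Decidable (Spec_countReachableIslands position L out) := by unfold Spec_countReachableIslands; infer_instance

-- ===== CLAIM (what is proved, stated in full; the proofs are below) =====
def Claim_equal_countReachableIslands : Prop := ∀ (position : List Int) (L : Int), Dom_countReachableIslands position L → Pre_countReachableIslands position L → Spec_countReachableIslands position L (countReachableIslands position L)

-- ===== LEMMAS AND PROOFS =====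

-- the last element of p :: l (the "prev" after consuming all of l starting from p)
def lastD (p : Int) : List Int → Int
  | [] => p
  | x :: xs => lastD x xs

-- forward chain test: every adjacent gap in p :: l is ≤ L
def fwdB (L p : Int) : List Int → Bool
  | [] => true
  | x :: xs => decide (x - p ≤ L) && fwdB L x xs

-- backward chain test: every adjacent downward gap in q :: l is ≤ L
def bwdB (L q : Int) : List Int → Bool
  | [] => true
  | x :: xs => decide (q - x ≤ L) && bwdB L x xs

theorem lastD_append_single (p x : Int) (m : List Int) : lastD p (m ++ [x]) = x := by
  induction m generalizing p with
  | nil => rfl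
  | cons a m ih => simpa [lastD] using ih a

theorem bwdB_append_single (L : Int) (m : List Int) : ∀ q p, bwdB L q (m ++ [p]) = (bwdB L q m && decide (lastD q m - p ≤ L)) := by
  induction m with
  | nil => intro q p; simp [bwdB, lastD]
  | cons a m ih => intro q p; simp [bwdB, lastD, ih a p, Bool.and_assoc]

theorem fwdB_reverse (L : Int) (l : List Int) : ∀ p q, fwdB L p (l ++ [q]) = bwdB L q (l.reverse ++ [p]) := by
  induction l with
  | nil => intro p q; simp [fwdB, bwdB]
  | cons x l ih =>
    intro p q
    have h1 : (x :: l).reverse ++ [p] = (l.reverse ++ [x]) ++ [p] := by simp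
    rw [h1, bwdB_append_single, ← ih x q, lastD_append_single]
    simp [fwdB, Bool.and_comm]

theorem criLoop2_shift (L : Int) (xs : List Int) : ∀ p c, criLoop2 L p c xs = c + criLoop2 L p 0 xs := by
  induction xs with
  | nil => intro p c; simp [criLoop2]
  | cons x xs ih =>
    intro p c
    by_cases h : x ≤ p + L
    · simp only [criLoop2, if_pos h]
      rw [ih x (c + 1), ih x (0 + 1)]; ring
    · simp only [criLoop2]
      rw [if_neg h, if_neg h]; ring

theorem criLoop3_shift (L : Int) (m : List Int) : ∀ p c, criLoop3 L p c m = c + criLoop3 L p 0 m := by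
  induction m with
  | nil => intro p c; simp [criLoop3]
  | cons x m ih =>
    intro p c
    by_cases h : x ≥ p - L
    · simp only [criLoop3, if_pos h]
      rw [ih x (c + 1), ih x (0 + 1)]; ring
    · simp only [criLoop3]
      rw [if_neg h, if_neg h]; ring

theorem pvRun_len (L : Int) (xs : List Int) : ∀ p, (((pvRun p xs L).1).length : Int) = criLoop2 L p 0 xs := by
  induction xs with
  | nil => intro p; simp [pvRun, criLoop2]
  | cons x xs ih =>
    intro p
    by_cases h : x - p ≤ L
    · have h' : x ≤ p + L := by omega
      simp only [pvRun, if_pos h, criLoop2, if_pos h']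
      rw [criLoop2_shift L xs x (0 + 1), ← ih x]
      simp; omega
    · have h' : ¬ x ≤ p + L := by omega
      simp only [pvRun, criLoop2]
      rw [if_neg h, if_neg h']
      simp

theorem criLoop3_of_bwd (L : Int) (m : List Int) : ∀ q c, bwdB L q m = true → criLoop3 L q c m = c + (m.length : Int) := by
  induction m with
  | nil => intro q c _; simp [criLoop3]
  | cons x m ih =>
    intro q c h
    simp only [bwdB, Bool.and_eq_true, decide_eq_true_eq] at h
    have hx : x ≥ q - L := by omega
    simp only [criLoop3, if_pos hx]
    rw [ih x (c + 1) h.2]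
    simp; ring

theorem criLoop3_stop (L : Int) (m : List Int) : ∀ q c y t, lastD q m - y > L → criLoop3 L q c (m ++ y :: t) = criLoop3 L q c m := by
  induction m with
  | nil =>
    intro q c y t h
    simp only [lastD] at h
    simp only [List.nil_append, criLoop3]
    rw [if_neg (show ¬ y ≥ q - L by omega)]
  | cons z m ih =>
    intro q c y t h
    simp only [lastD] at h
    by_cases hz : z ≥ q - L
    · simp only [List.cons_append, criLoop3, if_pos hz]
      exact ih z (c + 1) y t h
    · simp only [List.cons_append, criLoop3]
      rw [if_neg hz, if_neg hz]

theorem pvRun_of_fwd (L : Int) (l₁ : List Int) : ∀ p l₂, fwdB L p l₁ = true →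
    pvRun p (l₁ ++ l₂) L = (l₁ ++ (pvRun (lastD p l₁) l₂ L).1, (pvRun (lastD p l₁) l₂ L).2) := by
  induction l₁ with
  | nil => intro p l₂ _; simp [lastD]
  | cons x l₁ ih =>
    intro p l₂ h
    simp only [fwdB, Bool.and_eq_true, decide_eq_true_eq] at h
    simp only [List.cons_append, pvRun, if_pos h.1, lastD]
    rw [ih x l₂ h.2]

theorem pvRun_stop (L : Int) (l₁ : List Int) : ∀ p l₂, fwdB L p l₁ = false →
    ∃ a z b, l₁ = a ++ z :: b ∧ fwdB L p a = true ∧ z - lastD p a > L ∧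
      pvRun p (l₁ ++ l₂) L = (a, z :: (b ++ l₂)) := by
  induction l₁ with
  | nil => intro p l₂ h; simp [fwdB] at h
  | cons x l₁ ih =>
    intro p l₂ h
    simp only [fwdB, Bool.and_eq_false_iff] at h
    by_cases hx : x - p ≤ L
    · have hf : fwdB L x l₁ = false := by
        rcases h with h | h
        · simp [hx] at h
        · exact h
      obtain ⟨a, z, b, hl, hfa, hgap, hrun⟩ := ih x l₂ hf
      refine ⟨x :: a, z, b, by simp [hl], ?_, ?_, ?_⟩
      · simp [fwdB, hx, hfa]
      · simpa [lastD] using hgap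
      · simp only [List.cons_append, pvRun, if_pos hx]
        rw [hrun]
    · refine ⟨[], x, l₁, rfl, rfl, (by simp only [lastD]; omega), ?_⟩
      simp only [List.cons_append, pvRun]
      rw [if_neg hx]

-- a reversed snoc list starts with its lastD
theorem reverse_append_single_eq (l : List Int) : ∀ x, ∃ t, l.reverse ++ [x] = lastD x l :: t := by
  induction l with
  | nil => intro x; exact ⟨[], rfl⟩
  | cons a l ih =>
    intro x
    obtain ⟨t, ht⟩ := ih a
    refine ⟨t ++ [x], ?_⟩
    simp only [List.reverse_cons, lastD]
    rw [ht]
    simp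

-- MAIN: pvFind over pvChunks equals 1 + rightward count + leftward count
theorem pv_main (L start : Int) : ∀ (n : Nat) (u : List Int), u.length ≤ n → ∀ v, (∀ y ∈ u, y ≠ start) →
    pvFind start (pvChunks (u ++ start :: v) L) = 1 + criLoop2 L start 0 v + criLoop3 L start 0 u.reverse := by
  intro n
  induction n with
  | zero =>
    intro u hu v _
    have hnil : u = [] := List.eq_nil_of_length_eq_zero (Nat.le_zero.mp hu)
    subst hnil
    rw [show ([] : List Int) ++ start :: v = start :: v from rfl, pvChunks]
    have hmem : start ∈ start :: (pvRun start v L).1 := List.mem_cons_self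
    simp only [pvFind, if_pos hmem]
    simp [criLoop3, pvRun_len L v start]
    omega
  | succ n ihn =>
    intro u hu v hne
    cases u with
    | nil =>
      rw [show ([] : List Int) ++ start :: v = start :: v from rfl, pvChunks]
      have hmem : start ∈ start :: (pvRun start v L).1 := List.mem_cons_self
      simp only [pvFind, if_pos hmem]
      simp [criLoop3, pvRun_len L v start]
      omega
    | cons x u' =>
      have hx : x ≠ start := hne x List.mem_cons_self
      have hu' : ∀ y ∈ u', y ≠ start := fun y hy => hne y (List.mem_cons_of_mem x hy)
      rw [show (x :: u') ++ start :: v = x :: (u' ++ start :: v) from rfl, pvChunks]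
      by_cases hf : fwdB L x (u' ++ [start]) = true
      · -- the whole left part chains into start: start is in the first chunk
        have hassoc : u' ++ start :: v = (u' ++ [start]) ++ v := by simp
        rw [hassoc, pvRun_of_fwd L (u' ++ [start]) x v hf, lastD_append_single]
        have hmem : start ∈ x :: ((u' ++ [start]) ++ (pvRun start v L).1) := by simp
        simp only [pvFind, if_pos hmem]
        have hb : bwdB L start ((x :: u').reverse) = true := by
          have h2 := fwdB_reverse L u' x start
          rw [h2] at hf
          simpa using hf
        rw [criLoop3_of_bwd L ((x :: u').reverse) start 0 hb]
        rw [← pvRun_len L v start]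
        simp only [List.length_cons, List.length_append, List.length_reverse, List.length_nil]
        push_cast
        omega
      · -- the chain from x breaks before start
        have hf' : fwdB L x (u' ++ [start]) = false := by
          cases hq : fwdB L x (u' ++ [start]) with
          | true => exact absurd hq hf
          | false => rfl
        obtain ⟨a, z, b, hl, hfa, hgap, hrun⟩ := pvRun_stop L (u' ++ [start]) x v hf'
        have hassoc : u' ++ start :: v = (u' ++ [start]) ++ v := by simp
        rw [hassoc, hrun]
        rcases List.eq_nil_or_concat b with hb0 | ⟨b', w, hbw⟩
        · -- b = [] : the break is exactly before start, so a = u'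
          subst hb0
          obtain ⟨hua, hsz⟩ := List.append_inj' (show u' ++ [start] = a ++ [z] by simpa using hl) rfl
          have hsz' : start = z := by simpa using hsz
          subst hua
          subst hsz'
          have hnot : start ∉ x :: u' := by
            intro hmem
            rcases List.mem_cons.mp hmem with h | h
            · exact hx h.symm
            · exact hu' start h rfl
          simp only [List.nil_append, pvFind, if_neg hnot]
          have hrest := ihn [] (Nat.zero_le n) v (by simp)
          simp only [List.nil_append, List.reverse_nil] at hrest
          simp only [criLoop3] at hrest
          rw [hrest]
          obtain ⟨t, ht⟩ := reverse_append_single_eq u' x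
          have hzero : criLoop3 L start 0 ((x :: u').reverse) = 0 := by
            rw [List.reverse_cons, ht]
            rw [show criLoop3 L start 0 (lastD x u' :: t) =
                if lastD x u' ≥ start - L then criLoop3 L (lastD x u') (0 + 1) t else 0 from rfl]
            rw [if_neg (show ¬ lastD x u' ≥ start - L by omega)]
          rw [hzero]
        · -- b = b' ++ [start] : the break is inside u'
          subst hbw
          simp only [List.concat_eq_append] at hl hrun ⊢
          obtain ⟨hu'eq, hsw⟩ := List.append_inj'
            (show u' ++ [start] = (a ++ z :: b') ++ [w] by rw [hl]; simp) rfl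
          have hsw' : start = w := by simpa using hsw
          subst hsw'
          have hnot : start ∉ x :: a := by
            intro hmem
            rcases List.mem_cons.mp hmem with h | h
            · exact hx h.symm
            · exact hu' start (by rw [hu'eq]; exact List.mem_append_left _ h) rfl
          simp only [pvFind, if_neg hnot]
          have hlen : (z :: b').length ≤ n := by
            have hul : (x :: u').length ≤ n + 1 := hu
            rw [hu'eq] at hul
            simp at hul ⊢
            omega
          have hne2 : ∀ y ∈ z :: b', y ≠ start := by
            intro y hy
            exact hu' y (by rw [hu'eq]; exact List.mem_append_right _ hy)
          have hrest := ihn (z :: b') hlen v hne2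
          rw [show (z :: b') ++ start :: v = z :: (b' ++ start :: v) from rfl] at hrest
          rw [show (b' ++ [start]) ++ v = b' ++ start :: v by simp]
          rw [hrest]
          have hurev : (x :: u').reverse = (z :: b').reverse ++ (x :: a).reverse := by
            rw [hu'eq]; simp
          obtain ⟨t, ht⟩ := reverse_append_single_eq a x
          have hstop : criLoop3 L start 0 ((x :: u').reverse) = criLoop3 L start 0 ((z :: b').reverse) := by
            have hlast : lastD start ((z :: b').reverse) = z := by
              rw [show (z :: b').reverse = b'.reverse ++ [z] by simp, lastD_append_single]
            have h3 := criLoop3_stop L ((z :: b').reverse) start 0 (lastD x a) t (by rw [hlast]; omega)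
            have hform : (x :: u').reverse = (z :: b').reverse ++ (lastD x a :: t) := by
              rw [hurev, List.reverse_cons, List.reverse_cons, ht]
            rw [hform, h3]
          rw [hstop]

-- criLoop1 finds the first occurrence of start
theorem criLoop1_spec (start : Int) (s : List Int) : start ∈ s → ∀ i, ∃ u v, s = u ++ start :: v ∧ (∀ y ∈ u, y ≠ start) ∧ criLoop1 start s i = (i + u.length, 1) := by
  induction s with
  | nil => intro h; simp at h
  | cons x xs ih =>
    intro h i
    by_cases hx : x = start
    · subst hx
      exact ⟨[], xs, rfl, by simp, by simp [criLoop1]⟩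
    · have hmem : start ∈ xs := by
        rcases List.mem_cons.mp h with h | h
        · exact absurd h.symm hx
        · exact h
      obtain ⟨u, v, hs, hne, hloop⟩ := ih hmem (i + 1)
      refine ⟨x :: u, v, by simp [hs], ?_, ?_⟩
      · intro y hy
        rcases List.mem_cons.mp hy with h | h
        · rw [h]; exact hx
        · exact hne y h
      · simp only [criLoop1, if_neg hx, hloop]
        simp [Prod.mk.injEq]
        omega

-- ===== VERDICT (by name: the statement is the Claim_ definition above) =====
theorem countReachableIslands_spec : Claim_equal_countReachableIslands := by
  intro position L _ hpre
  unfold Spec_countReachableIslands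
  cases position with
  | nil => exact absurd rfl hpre
  | cons x rest =>
    have hget : PySem.List.pyGet? (x :: rest) (0 : Int) = some x := by
      simp [PySem.List.pyGet?, PySem.List.pyIdx?]
    have e1 : countReachableIslands (x :: rest) L
        = criMain x (PySem.List.sorted (x :: rest) (fun x => x) false) L := by
      unfold countReachableIslands
      rw [hget]
    have e2 : countReachableIslands_alt (x :: rest) L
        = pvFind x (pvChunks (PySem.List.sorted (x :: rest) (fun x => x) false) L) := by
      unfold countReachableIslands_alt
      rw [hget]
    rw [e1, e2]
    have hx : x ∈ PySem.List.sorted (x :: rest) (fun x => x) false := by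
      rw [PySem.List.mem_sorted]
      exact List.mem_cons_self
    obtain ⟨u, v, hs, hne, hloop⟩ := criLoop1_spec x _ hx 0
    simp only [criMain]
    rw [hloop, hs]
    have hdrop : (u ++ x :: v).drop (0 + u.length + 1) = v := by
      rw [show u ++ x :: v = (u ++ [x]) ++ v by simp]
      rw [show 0 + u.length + 1 = (u ++ [x]).length by simp]
      exact List.drop_left
    have htake : (u ++ x :: v).take (0 + u.length) = u := by
      rw [show 0 + u.length = u.length by omega]
      exact List.take_left
    simp only [hdrop, htake]
    rw [criLoop3_shift L u.reverse x (criLoop2 L x 1 v), criLoop2_shift L v x 1]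
    rw [pv_main L x u.length u (Nat.le_refl _) v hne]
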